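-- pv_equiv track=rewrite | github.com/huixu11/openra-rl-challenge | scripts/collect_bot_data.py | primary_intent
-- ===== SOURCE A (Python) =====
-- from typing import Any
--
-- def primary_intent(macros: list[dict[str, Any]]) -> str:
--     intents = [str(m.get("intent", "no_op")) for m in macros]
--     if not intents:
--         return "no_op"
--     if len(set(intents)) == 1:
--         return intents[0]
--     if any(intent in {"attack", "attack_move"} for intent in intents):
--         return "combat_mixed"
--     if any(intent in {"construct", "build", "place_building"} for intent in intents):
--         return "base_mixed"
--     if any(intent == "train" for intent in intents):
--         return "production_mixed"
--     return "mixed"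
-- ===== SOURCE B (Python) =====
-- def primary_intent(macros):
--     if not macros:
--         return "no_op"
--     first = None
--     all_same = True
--     has_combat = has_base = has_train = False
--     for m in macros:
--         intent = str(m.get("intent", "no_op"))
--         if first is None:
--             first = intent
--         elif intent != first:
--             all_same = False
--         if intent in ("attack", "attack_move"):
--             has_combat = True
--         elif intent in ("construct", "build", "place_building"):
--             has_base = True
--         elif intent == "train":
--             has_train = True
--     if all_same:
--         return first
--     if has_combat:
--         return "combat_mixed"
--     if has_base:
--         return "base_mixed"
--     if has_train:
--         return "production_mixed"
--     return "mixed"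
-- ===== Notes on version B (the rewrite author's own statement) =====
-- stated objective: alternative
-- what changed: Replaces the intents list, the set() build and the three separate any() scans with a single fold over macros maintaining five flags (first intent, all-same, has-combat, has-base, has-train) and a constant-time priority cascade at the end.
import Mathlib
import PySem

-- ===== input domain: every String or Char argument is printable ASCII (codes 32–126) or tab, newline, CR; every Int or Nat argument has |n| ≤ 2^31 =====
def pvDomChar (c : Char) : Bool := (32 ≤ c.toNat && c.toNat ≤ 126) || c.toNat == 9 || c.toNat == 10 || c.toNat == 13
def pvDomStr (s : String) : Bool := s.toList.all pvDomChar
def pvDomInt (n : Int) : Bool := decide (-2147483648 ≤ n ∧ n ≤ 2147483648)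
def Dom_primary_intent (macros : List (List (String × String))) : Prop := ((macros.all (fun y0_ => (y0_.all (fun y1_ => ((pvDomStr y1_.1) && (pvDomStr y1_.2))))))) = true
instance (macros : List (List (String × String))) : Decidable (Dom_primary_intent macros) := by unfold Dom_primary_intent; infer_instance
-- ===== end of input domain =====

-- B replaces the intents list, the set() build and three separate any() scans by one
-- fold over macros keeping five flags, then a constant-time priority cascade (alternative decomposition).

-- ===== PORT A =====
def primary_intent (macros : List (List (String × String))) : String :=
  let intents := macros.map (fun m => PySem.Dict.getD (PySem.Dict.mk m) "intent" "no_op")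
  if intents.isEmpty then "no_op"
  else if PySem.Set.len (PySem.Set.ofList intents) == 1 then PySem.List.pyGetD intents 0 ""
  else if intents.any (fun i => i == "attack" || i == "attack_move") then "combat_mixed"
  else if intents.any (fun i => i == "construct" || i == "build" || i == "place_building") then "base_mixed"
  else if intents.any (fun i => i == "train") then "production_mixed"
  else "mixed"

-- ===== PORT B =====
-- state: (first, all_same, has_combat, has_base, has_train)
def pvStep (s : Option String × Bool × Bool × Bool × Bool) (intent : String) :
    Option String × Bool × Bool × Bool × Bool :=
  let (first, allSame, hc, hb, ht) := s
  let first' := if first.isNone then some intent else first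
  let allSame' := match first with
    | none => allSame
    | some f => if intent == f then allSame else false
  if intent == "attack" || intent == "attack_move" then (first', allSame', true, hb, ht)
  else if intent == "construct" || intent == "build" || intent == "place_building" then
    (first', allSame', hc, true, ht)
  else if intent == "train" then (first', allSame', hc, hb, true)
  else (first', allSame', hc, hb, ht)

def primary_intent_alt (macros : List (List (String × String))) : String :=
  if macros.isEmpty then "no_op"
  else
    let s := macros.foldl (fun st m => pvStep st (PySem.Dict.getD (PySem.Dict.mk m) "intent" "no_op"))
      (none, true, false, false, false)
    let (first, allSame, hc, hb, ht) := s
    if allSame then first.getD ""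
    else if hc then "combat_mixed"
    else if hb then "base_mixed"
    else if ht then "production_mixed"
    else "mixed"

-- ===== PRECONDITION & SPEC =====
def Spec_primary_intent (macros : List (List (String × String))) (out : String) : Prop := out = primary_intent_alt macros
instance (macros : List (List (String × String))) (out : String) : Decidable (Spec_primary_intent macros out) := by unfold Spec_primary_intent; infer_instance

-- ===== CLAIM (what is proved, stated in full; the proofs are below) =====
def Claim_equal_primary_intent : Prop := ∀ (macros : List (List (String × String))), Dom_primary_intent macros → Spec_primary_intent macros (primary_intent macros)

-- ===== LEMMAS AND PROOFS =====

def pvIsC (i : String) : Bool := i == "attack" || i == "attack_move"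
def pvIsB (i : String) : Bool := i == "construct" || i == "build" || i == "place_building"
def pvIsT (i : String) : Bool := i == "train"

theorem pvC_notB (i : String) (h : pvIsC i = true) : pvIsB i = false := by
  unfold pvIsC at h
  rcases Bool.or_eq_true_iff.mp h with h | h <;> simp only [beq_iff_eq] at h <;> subst h <;> decide

theorem pvC_notT (i : String) (h : pvIsC i = true) : pvIsT i = false := by
  unfold pvIsC at h
  rcases Bool.or_eq_true_iff.mp h with h | h <;> simp only [beq_iff_eq] at h <;> subst h <;> decide

theorem pvB_notT (i : String) (h : pvIsB i = true) : pvIsT i = false := by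
  unfold pvIsB at h
  rcases Bool.or_eq_true_iff.mp h with h | h
  · rcases Bool.or_eq_true_iff.mp h with h | h <;> simp only [beq_iff_eq] at h <;> subst h <;> decide
  · simp only [beq_iff_eq] at h; subst h; decide

theorem pvStep_some (f intent : String) (as hc hb ht : Bool) :
    pvStep (some f, as, hc, hb, ht) intent =
      (some f, as && (intent == f), hc || pvIsC intent, hb || pvIsB intent, ht || pvIsT intent) := by
  have key : pvStep (some f, as, hc, hb, ht) intent =
      (if (some f : Option String).isNone then some intent else some f,
       if intent == f then as else false,
       hc || pvIsC intent, hb || pvIsB intent, ht || pvIsT intent) := by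
    by_cases h1 : pvIsC intent = true
    · have h2 := pvC_notB intent h1
      have h3 := pvC_notT intent h1
      have h1' := h1
      unfold pvIsC at h1'
      simp [pvStep, h1', h1, h2, h3]
    · by_cases h2 : pvIsB intent = true
      · have h3 := pvB_notT intent h2
        have h1' : (intent == "attack" || intent == "attack_move") = false := by
          simpa [pvIsC] using h1
        have h2' : (intent == "construct" || intent == "build" || intent == "place_building") = true := by
          simpa [pvIsB] using h2
        simp [pvStep, h1', h2', h1, h2, h3]
      · have h1' : (intent == "attack" || intent == "attack_move") = false := by
          simpa [pvIsC] using h1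
        have h2' : (intent == "construct" || intent == "build" || intent == "place_building") = false := by
          simpa [pvIsB] using h2
        by_cases h3 : pvIsT intent = true
        · have h3' : (intent == "train") = true := by simpa [pvIsT] using h3
          simp [pvStep, h1', h2', h3', h1, h2, h3]
        · have h3' : (intent == "train") = false := by simpa [pvIsT] using h3
          simp [pvStep, h1', h2', h3', h1, h2, h3]
  rw [key]
  simp only [Option.isNone_some, Bool.false_eq_true, if_false]
  by_cases hf : (intent == f) = true <;> simp [hf]

theorem pvStep_none (intent : String) (as hc hb ht : Bool) :
    pvStep (none, as, hc, hb, ht) intent =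
      (some intent, as, hc || pvIsC intent, hb || pvIsB intent, ht || pvIsT intent) := by
  by_cases h1 : pvIsC intent = true
  · have h2 := pvC_notB intent h1
    have h3 := pvC_notT intent h1
    have h1' := h1; unfold pvIsC at h1'
    simp [pvStep, h1', h1, h2, h3]
  · by_cases h2 : pvIsB intent = true
    · have h3 := pvB_notT intent h2
      have h1' : (intent == "attack" || intent == "attack_move") = false := by
        simpa [pvIsC] using h1
      have h2' : (intent == "construct" || intent == "build" || intent == "place_building") = true := by
        simpa [pvIsB] using h2
      simp [pvStep, h1', h2', h1, h2, h3]
    · have h1' : (intent == "attack" || intent == "attack_move") = false := by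
        simpa [pvIsC] using h1
      have h2' : (intent == "construct" || intent == "build" || intent == "place_building") = false := by
        simpa [pvIsB] using h2
      by_cases h3 : pvIsT intent = true
      · have h3' : (intent == "train") = true := by simpa [pvIsT] using h3
        simp [pvStep, h1', h2', h3', h1, h2, h3]
      · have h3' : (intent == "train") = false := by simpa [pvIsT] using h3
        simp [pvStep, h1', h2', h3', h1, h2, h3]

theorem pvFold_some (xs : List String) (f : String) (as hc hb ht : Bool) :
    xs.foldl pvStep (some f, as, hc, hb, ht) =
      (some f, as && xs.all (· == f), hc || xs.any pvIsC, hb || xs.any pvIsB, ht || xs.any pvIsT) := by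
  induction xs generalizing as hc hb ht with
  | nil => simp
  | cons y ys ih =>
    simp only [List.foldl_cons, pvStep_some, ih, List.all_cons, List.any_cons]
    simp [Bool.and_assoc, Bool.or_assoc]

theorem pvLen_le_foldl_add (xs : List String) (s : List String) :
    s.length ≤ (xs.foldl PySem.Set.add s).length := by
  induction xs generalizing s with
  | nil => simp
  | cons y ys ih =>
    refine le_trans ?_ (ih _)
    unfold PySem.Set.add
    split <;> simp

theorem pvSet_len_one (x : String) (xs : List String) :
    ((xs.foldl PySem.Set.add [x]).length = 1) ↔ xs.all (· == x) = true := by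
  induction xs with
  | nil => simp
  | cons y ys ih =>
    simp only [List.foldl_cons, List.all_cons]
    by_cases h : y = x
    · subst h
      have hmem : y ∈ [y] := by simp
      rw [PySem.Set.add_of_mem hmem]
      simp [ih]
    · have hne : (y == x) = false := by simp [h]
      have hnm : y ∉ [x] := by simp [h]
      rw [PySem.Set.add_of_not_mem hnm]
      constructor
      · intro hlen
        exfalso
        have h2 := pvLen_le_foldl_add ys ([x] ++ [y])
        rw [hlen] at h2
        simp at h2
      · intro hh; simp [hne] at hh

theorem pvMain (x : String) (ys : List String) :
    (if (PySem.Set.len (PySem.Set.ofList (x :: ys)) == (1 : Int)) = true then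
       PySem.List.pyGetD (x :: ys) 0 ""
     else if ((x :: ys).any fun i => i == "attack" || i == "attack_move") = true then "combat_mixed"
     else if ((x :: ys).any fun i => i == "construct" || i == "build" || i == "place_building") = true then "base_mixed"
     else if ((x :: ys).any fun i => i == "train") = true then "production_mixed"
     else "mixed")
    =
    (if (ys.all (· == x)) = true then x
     else if ((x :: ys).any pvIsC) = true then "combat_mixed"
     else if ((x :: ys).any pvIsB) = true then "base_mixed"
     else if ((x :: ys).any pvIsT) = true then "production_mixed"
     else "mixed") := by
  have hset : (PySem.Set.len (PySem.Set.ofList (x :: ys)) == (1 : Int)) = ys.all (· == x) := by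
    rw [PySem.Set.ofList_eq_foldl]
    simp only [List.foldl_cons]
    have h0 : PySem.Set.add ([] : List String) x = [x] := by
      have hnm : x ∉ ([] : List String) := by simp
      rw [PySem.Set.add_of_not_mem hnm]
      rfl
    rw [h0]
    have hiff := pvSet_len_one x ys
    rcases Bool.eq_false_or_eq_true (ys.all (· == x)) with h | h <;>
      simp [h, PySem.Set.len] at hiff ⊢ <;> omega
  simp only [hset]
  by_cases hall : ys.all (· == x) = true
  · simp [hall, PySem.List.pyGetD_zero_cons]
  · simp only [Bool.not_eq_true] at hall
    simp only [hall, Bool.false_eq_true, if_false]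
    rfl

theorem primary_intent_eq (macros : List (List (String × String))) :
    primary_intent macros = primary_intent_alt macros := by
  unfold primary_intent primary_intent_alt
  cases macros with
  | nil => simp
  | cons m ms =>
    simp only [List.isEmpty_cons, List.map_cons, Bool.false_eq_true, if_false, List.foldl_cons]
    have hB : ms.foldl (fun st m => pvStep st (PySem.Dict.getD (PySem.Dict.mk m) "intent" "no_op"))
        (pvStep (none, true, false, false, false) (PySem.Dict.getD (PySem.Dict.mk m) "intent" "no_op")) =
        (some (PySem.Dict.getD (PySem.Dict.mk m) "intent" "no_op"),
         (ms.map (fun m => PySem.Dict.getD (PySem.Dict.mk m) "intent" "no_op")).all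
           (· == PySem.Dict.getD (PySem.Dict.mk m) "intent" "no_op"),
         ((PySem.Dict.getD (PySem.Dict.mk m) "intent" "no_op") ::
           ms.map (fun m => PySem.Dict.getD (PySem.Dict.mk m) "intent" "no_op")).any pvIsC,
         ((PySem.Dict.getD (PySem.Dict.mk m) "intent" "no_op") ::
           ms.map (fun m => PySem.Dict.getD (PySem.Dict.mk m) "intent" "no_op")).any pvIsB,
         ((PySem.Dict.getD (PySem.Dict.mk m) "intent" "no_op") ::
           ms.map (fun m => PySem.Dict.getD (PySem.Dict.mk m) "intent" "no_op")).any pvIsT) := by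
      rw [← List.foldl_map (f := fun m => PySem.Dict.getD (PySem.Dict.mk m) "intent" "no_op")
            (g := pvStep), pvStep_none, pvFold_some]
      simp [List.any_cons]
    simp only [hB]
    exact pvMain _ _

-- ===== VERDICT (by name: the statement is the Claim_ definition above) =====
theorem primary_intent_spec : Claim_equal_primary_intent := by
  intro macros _
  exact primary_intent_eq macros
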